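-- pv_equiv track=rewrite | github.com/utkarsh-ficha/datumaro | src/datumaro/components/visualizer.py | _infer_grid_size
-- ===== SOURCE A (Python) =====
-- import math
-- from typing import Iterable, List, Optional, Tuple, Union, overload
--
-- def _infer_grid_size(length: int, grid_size: Tuple[Optional[int], Optional[int]]):
--     nrows, ncols = grid_size
--
--     if nrows is None and ncols is None:
--         nrows = ncols = int(math.sqrt(length))
--
--         while nrows * ncols < length:
--             nrows += 1
--     elif nrows is None and ncols > 0:
--         nrows = int(length / ncols)
--
--         while nrows * ncols < length:
--             nrows += 1
--     elif nrows > 0 and ncols is None: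
--         ncols = int(length / nrows)
--
--         while nrows * ncols < length:
--             ncols += 1
--
--     assert nrows > 0, "nrows should be a positive integer."
--     assert ncols > 0, "ncols should be a positive integer."
--     assert length <= nrows * ncols, "The number of ids should less then or equal to nrows * ncols."
--
--     return nrows, ncols
-- ===== SOURCE B (Python) =====
-- import math
--
--
-- def _ceil_div(length, m):
--     # exact integer ceiling of length / m for m > 0
--     return (length + m - 1) // m
--
--
-- def _infer_grid_size(length, grid_size):
--     # Stage 1: normalize the all-unknown case to "columns known".
--     if grid_size == (None, None):
--         grid_size = (None, math.isqrt(length))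
--
--     # Stage 2: fill in the single missing axis by ceiling division.
--     nrows, ncols = grid_size
--     if nrows is None:
--         nrows = _ceil_div(length, ncols)
--     elif ncols is None:
--         ncols = _ceil_div(length, nrows)
--
--     assert nrows > 0, "nrows should be a positive integer."
--     assert ncols > 0, "ncols should be a positive integer."
--     assert length <= nrows * ncols, "The number of ids should less then or equal to nrows * ncols."
--
--     return nrows, ncols
-- ===== Notes on version B (the rewrite author's own statement) =====
-- stated objective: simpler
-- what changed: B first normalizes the (None, None) case to a known column count (isqrt), then fills the one missing axis with a single shared closed-form ceiling division (length+m-1)//m, eliminating A's three incrementing while-loops and float division.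
import Mathlib
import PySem

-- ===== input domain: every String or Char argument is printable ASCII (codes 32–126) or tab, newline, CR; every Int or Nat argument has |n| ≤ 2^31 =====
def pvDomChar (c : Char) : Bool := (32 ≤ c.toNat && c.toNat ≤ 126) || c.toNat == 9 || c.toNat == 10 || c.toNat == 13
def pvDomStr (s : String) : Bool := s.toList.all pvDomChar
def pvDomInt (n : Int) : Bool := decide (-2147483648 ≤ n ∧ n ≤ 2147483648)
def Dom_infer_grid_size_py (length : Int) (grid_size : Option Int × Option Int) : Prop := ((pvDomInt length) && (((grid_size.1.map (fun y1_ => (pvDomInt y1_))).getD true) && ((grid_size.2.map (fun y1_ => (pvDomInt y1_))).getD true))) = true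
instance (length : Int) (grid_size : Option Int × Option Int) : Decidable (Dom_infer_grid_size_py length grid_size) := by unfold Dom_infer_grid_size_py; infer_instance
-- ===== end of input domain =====

-- B normalizes (None,None) to a known column count and fills the one missing axis by a
-- shared closed-form ceiling division, replacing A's three incrementing while-loops
-- (objective: simpler).

-- ===== PORT A =====
-- 'while x * m < length: x += 1' — increments x while the product is below length.
-- The 'if 0 < m' inner guard is a totality guard only: with m ≤ 0 and x*m < length Python
-- would loop forever; that state is unreachable from A's branches (and outside Pre_).
def pvLoopInc (length m x : Int) : Int :=
  if x * m < length then
    if h : 0 < m then pvLoopInc length m (x + 1) else x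
  else x
termination_by (length - x * m).toNat
decreasing_by
  rename_i hlt
  have : (x + 1) * m = x * m + m := by ring
  omega

-- A's int(math.sqrt(length)): exact floor of the real square root for 0 ≤ length ≤ 2^31
-- (the double result never rounds across an integer there); for length < 0 Python raises
-- ValueError — those inputs are outside Pre_.
def pyIsqrt (length : Int) : Int := (Nat.sqrt length.toNat : Int)

-- int(length / c): float division then truncation; equals exact truncating integer division
-- for |length|, |c| ≤ 2^31 (both representable exactly, quotient never rounds across an integer).
def infer_grid_size_py (length : Int) (grid_size : Option Int × Option Int) : Int × Int :=
  match grid_size with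
  | (none, none) =>
      let s := pyIsqrt length
      (pvLoopInc length s s, s)
  | (none, some c) =>
      if 0 < c then (pvLoopInc length c (length.tdiv c), c)
      else (0, c)  -- Python: falls through, 'assert None > 0' raises TypeError (outside Pre_)
  | (some r, none) =>
      if 0 < r then (r, pvLoopInc length r (length.tdiv r))
      else (r, 0)  -- Python: falls through, assert raises (outside Pre_)
  | (some r, some c) => (r, c)  -- asserts raise outside Pre_

-- ===== PORT B =====
-- _ceil_div: (length + m - 1) // m, Python floor division.
def pvCeilDiv (length m : Int) : Int := PySem.Int.floordiv (length + m - 1) m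

-- Stage 1 of B: normalize (None, None) to "columns known"; math.isqrt is the exact integer
-- square root, the same pyIsqrt as A's helper (raises ValueError for length < 0, outside Pre_).
def pvNormalize (length : Int) (grid_size : Option Int × Option Int) : Option Int × Option Int :=
  if grid_size = (none, none) then (none, some (pyIsqrt length)) else grid_size

-- Stage 2 of B: fill the single missing axis.
def infer_grid_size_py_alt (length : Int) (grid_size : Option Int × Option Int) : Int × Int :=
  match pvNormalize length grid_size with
  | (none, some c) => (pvCeilDiv length c, c)
  | (some r, none) => (r, pvCeilDiv length r)
  | (some r, some c) => (r, c)
  | (none, none) => (0, 0)  -- unreachable: pvNormalize never returns (none, none)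

-- ===== PRECONDITION & SPEC =====
-- Pre_ = exactly the inputs where A returns: elsewhere A raises (ValueError on sqrt of a
-- negative, TypeError comparing None, or one of the three AssertionErrors).
def Pre_infer_grid_size_py (length : Int) (grid_size : Option Int × Option Int) : Prop :=
  0 < grid_size.1.getD 1 ∧ 0 < grid_size.2.getD 1 ∧
  ((grid_size.1 = none ∨ grid_size.2 = none) → 1 ≤ length) ∧
  (grid_size.1 ≠ none → grid_size.2 ≠ none → length ≤ grid_size.1.getD 0 * grid_size.2.getD 0)

instance (length : Int) (grid_size : Option Int × Option Int) : Decidable (Pre_infer_grid_size_py length grid_size) := by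
  unfold Pre_infer_grid_size_py; infer_instance

def pvWitness_infer_grid_size_py : Int × (Option Int × Option Int) := (7, (none, none))

def Spec_infer_grid_size_py (length : Int) (grid_size : Option Int × Option Int) (out : Int × Int) : Prop := out = infer_grid_size_py_alt length grid_size
instance (length : Int) (grid_size : Option Int × Option Int) (out : Int × Int) : Decidable (Spec_infer_grid_size_py length grid_size out) := by unfold Spec_infer_grid_size_py; infer_instance

-- ===== CLAIM (what is proved, stated in full; the proofs are below) =====
def Claim_equal_infer_grid_size_py : Prop := ∀ (length : Int) (grid_size : Option Int × Option Int), Dom_infer_grid_size_py length grid_size → Pre_infer_grid_size_py length grid_size → Spec_infer_grid_size_py length grid_size (infer_grid_size_py length grid_size)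

-- ===== LEMMAS AND PROOFS =====

-- ceiling-division bounds: for 0 < m,  (C-1)*m < length ≤ C*m  where C = pvCeilDiv length m
theorem pvCeilDiv_bounds (length m : Int) (hm : 0 < m) :
    length ≤ pvCeilDiv length m * m ∧ (pvCeilDiv length m - 1) * m < length := by
  have hfe : (length + m - 1).fdiv m = (length + m - 1) / m := by
    rw [Int.fdiv_eq_ediv]
    simp [le_of_lt hm]
  have h1 : m * ((length + m - 1) / m) + (length + m - 1) % m = length + m - 1 :=
    Int.mul_ediv_add_emod _ _
  have h2 : 0 ≤ (length + m - 1) % m := Int.emod_nonneg _ (ne_of_gt hm)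
  have h3 : (length + m - 1) % m < m := Int.emod_lt_of_pos _ hm
  unfold pvCeilDiv PySem.Int.floordiv
  rw [hfe]
  constructor <;> nlinarith [h1, h2, h3]

-- the while loop from any start x ≤ C reaches exactly C = ⌈length/m⌉
theorem pvLoopInc_eq (length m : Int) (hm : 0 < m) :
    ∀ x, x ≤ pvCeilDiv length m → pvLoopInc length m x = pvCeilDiv length m := by
  intro x hx
  obtain ⟨hub, hlb⟩ := pvCeilDiv_bounds length m hm
  generalize hk : (pvCeilDiv length m - x).toNat = k
  induction k generalizing x with
  | zero =>
      have hx' : x = pvCeilDiv length m := by omega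
      subst hx'
      unfold pvLoopInc
      have : ¬ pvCeilDiv length m * m < length := by omega
      simp [this]
  | succ n ih =>
      have hlt : x < pvCeilDiv length m := by omega
      have hxlt : x * m < length := by nlinarith
      unfold pvLoopInc
      simp [hxlt, hm]
      exact ih (x + 1) (by omega) (by omega)

-- for 1 ≤ length and 0 < c, int(length/c) (truncating) is at most the ceiling
theorem tdiv_le_ceil (length c : Int) (hl : 1 ≤ length) (hc : 0 < c) :
    length.tdiv c ≤ pvCeilDiv length c := by
  obtain ⟨hub, _⟩ := pvCeilDiv_bounds length c hc
  have h1 : length.tdiv c = length / c := Int.tdiv_eq_ediv_of_nonneg (by omega)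
  have h2 : length / c * c ≤ length := Int.ediv_mul_le length (by omega)
  nlinarith

theorem isqrt_pos (length : Int) (hl : 1 ≤ length) : 0 < pyIsqrt length := by
  unfold pyIsqrt
  have : 1 ≤ Nat.sqrt length.toNat := by
    have : 1 ≤ length.toNat := by omega
    calc 1 = Nat.sqrt 1 := rfl
      _ ≤ Nat.sqrt length.toNat := Nat.sqrt_le_sqrt this
  omega

-- isqrt start point is at most the ceiling: s*s ≤ length → s ≤ ⌈length/s⌉
theorem isqrt_le_ceil (length : Int) (hl : 1 ≤ length) :
    pyIsqrt length ≤ pvCeilDiv length (pyIsqrt length) := by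
  have hs : 0 < pyIsqrt length := isqrt_pos length hl
  have hsq : pyIsqrt length * pyIsqrt length ≤ length := by
    unfold pyIsqrt
    have h := Nat.sqrt_le' length.toNat
    have h2 : Nat.sqrt length.toNat * Nat.sqrt length.toNat ≤ length.toNat := by
      simpa [pow_two] using h
    omega
  obtain ⟨hub, _⟩ := pvCeilDiv_bounds length _ hs
  nlinarith

-- ===== VERDICT (by name: the statement is the Claim_ definition above) =====
theorem infer_grid_size_py_spec : Claim_equal_infer_grid_size_py := by
  intro length gs _hdom hpre
  unfold Spec_infer_grid_size_py
  unfold Pre_infer_grid_size_py at hpre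
  obtain ⟨r?, c?⟩ := gs
  match r?, c? with
  | none, none =>
      have hl : 1 ≤ length := by simpa using hpre.2.2.1
      have hs := isqrt_pos length hl
      simp only [infer_grid_size_py, infer_grid_size_py_alt, pvNormalize]
      rw [pvLoopInc_eq length _ hs _ (isqrt_le_ceil length hl)]
      simp
  | none, some c =>
      have hc : 0 < c := by simpa using hpre.2.1
      have hl : 1 ≤ length := by simpa using hpre.2.2.1
      have hne : ((none : Option Int), some c) ≠ ((none : Option Int), (none : Option Int)) := by
        simp
      simp only [infer_grid_size_py, infer_grid_size_py_alt, pvNormalize, if_neg hne,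
        if_pos hc]
      rw [pvLoopInc_eq length c hc _ (tdiv_le_ceil length c hl hc)]
  | some r, none =>
      have hr : 0 < r := by simpa using hpre.1
      have hl : 1 ≤ length := by simpa using hpre.2.2.1
      have hne : (some r, (none : Option Int)) ≠ ((none : Option Int), (none : Option Int)) := by
        simp
      simp only [infer_grid_size_py, infer_grid_size_py_alt, pvNormalize, if_neg hne,
        if_pos hr]
      rw [pvLoopInc_eq length r hr _ (tdiv_le_ceil length r hl hr)]
  | some r, some c =>
      have hne : (some r, some c) ≠ ((none : Option Int), (none : Option Int)) := by simp
      simp [infer_grid_size_py, infer_grid_size_py_alt, pvNormalize]
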